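-- pv_equiv track=rewrite | github.com/dainlp/acl2020-transition-discontinuous-ner | code/xdai/utils/token.py | preprocess_twitter
-- ===== SOURCE A (Python) =====
-- def preprocess_twitter(text):
--     tokens = []
--     for token in text.strip().split():
--         if len(token) > 1 and (token[0] == "@" or token[0] == "#"):
--             tokens.append(token[0])
--             tokens.append(token[1:])
--         else:
--             tokens.append(token)
--     return " ".join(tokens)
-- ===== SOURCE B (Python) =====
-- def preprocess_twitter(text):
--     s = " ".join(text.split())
--     out = []
--     prev = " "
--     for i, c in enumerate(s):
--         out.append(c)
--         if c in "@#" and prev == " " and i + 1 < len(s) and s[i + 1] != " ":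
--             out.append(" ")
--         prev = c
--     return "".join(out)
-- ===== Notes on version B (the rewrite author's own statement) =====
-- stated objective: alternative
-- what changed: Replaces the token-list loop (split, per-token if/else appending one or two pieces, re-join) by a single left-to-right character scan over the whitespace-normalized string that inserts a space after a token-leading @/# (tracking the previous character), so no intermediate token list is built.
import Mathlib
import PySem

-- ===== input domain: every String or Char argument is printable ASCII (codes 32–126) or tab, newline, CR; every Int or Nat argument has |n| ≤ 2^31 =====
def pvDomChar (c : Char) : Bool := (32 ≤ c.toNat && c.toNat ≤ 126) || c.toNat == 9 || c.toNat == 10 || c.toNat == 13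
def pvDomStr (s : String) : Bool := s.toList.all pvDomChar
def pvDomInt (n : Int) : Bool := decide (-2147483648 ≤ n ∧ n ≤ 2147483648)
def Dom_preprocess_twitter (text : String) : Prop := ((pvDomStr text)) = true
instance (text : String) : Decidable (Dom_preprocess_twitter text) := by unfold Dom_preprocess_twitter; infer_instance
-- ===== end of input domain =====

-- B replaces A's per-token loop (split, if/else appends, re-join) by a single character scan over the whitespace-normalized string; same asymptotic cost.

-- ===== PORT A =====
-- the loop body: A appends token[0] and token[1:] when the token has length > 1 and starts
-- with '@'/'#', else the token itself; token[0] is the guarded pyGet? (the .getD "" default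
-- is unreachable: the guard forces 1 < len(token))

def pvTokStep (acc : List String) (token : String) : List String :=
  if 1 < PySem.Str.len token ∧
      (PySem.Str.pyGet? token 0 = some '@' ∨ PySem.Str.pyGet? token 0 = some '#') then
    acc ++ [((PySem.Str.pyGet? token 0).map (fun c => String.ofList [c])).getD "",
            PySem.Str.slice token (some 1) none]
  else
    acc ++ [token]

def preprocess_twitter (text : String) : String :=
  PySem.Str.join " " ((PySem.Str.split₀ (PySem.Str.strip text)).foldl pvTokStep [])

-- ===== PORT B =====
-- one pass over the characters of ' '.join(text.split()); `prev` is the previous character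
-- (' ' at the start); `rest.head?.getD ' '` is the peek that ports `i + 1 < len(s) and s[i+1] != ' '`
def pvScan : List Char → Char → List Char
  | [], _ => []
  | c :: rest, prev =>
    if ((c == '@' || c == '#') && prev == ' ' && (rest.head?.getD ' ' != ' ')) then
      c :: ' ' :: pvScan rest c
    else
      c :: pvScan rest c

def preprocess_twitter_alt (text : String) : String :=
  String.ofList (pvScan (PySem.Str.join " " (PySem.Str.split₀ text)).toList ' ')

-- ===== PRECONDITION & SPEC =====
def Spec_preprocess_twitter (text : String) (out : String) : Prop := out = preprocess_twitter_alt text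
instance (text : String) (out : String) : Decidable (Spec_preprocess_twitter text out) := by unfold Spec_preprocess_twitter; infer_instance

-- ===== CLAIM (what is proved, stated in full; the proofs are below) =====
def Claim_equal_preprocess_twitter : Prop := ∀ (text : String), Dom_preprocess_twitter text → Spec_preprocess_twitter text (preprocess_twitter text)

-- ===== LEMMAS AND PROOFS =====

-- what A does to one token, at the character level
def pvG (t : List Char) : List Char :=
  match t with
  | c :: d :: rest => if c = '@' ∨ c = '#' then c :: ' ' :: d :: rest else c :: d :: rest
  | _ => t

-- ---------- split₀ lemmas ----------
theorem pv_go_ws_end (w : List Char) (hw : ∀ c ∈ w, PySem.Chars.isspace c = true) :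
    ∀ (cur : List Char) (acc : List (List Char)),
      PySem.Chars.split₀.go w cur acc = PySem.Chars.split₀.go [] cur acc := by
  induction w with
  | nil => intro _ _; rfl
  | cons c w ih =>
    intro cur acc
    have hc : PySem.Chars.isspace c = true := hw c (by simp)
    have hw' : ∀ c ∈ w, PySem.Chars.isspace c = true := fun x hx => hw x (by simp [hx])
    by_cases hcur : cur.isEmpty
    · simp [PySem.Chars.split₀.go, hc, hcur, ih hw' [] acc]
    · simp [PySem.Chars.split₀.go, hc, hcur, ih hw' [] (cur.reverse :: acc)]

theorem pv_go_append_ws (w : List Char) (hw : ∀ c ∈ w, PySem.Chars.isspace c = true) :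
    ∀ (s cur : List Char) (acc : List (List Char)),
      PySem.Chars.split₀.go (s ++ w) cur acc = PySem.Chars.split₀.go s cur acc := by
  intro s
  induction s with
  | nil => intro cur acc; simpa using pv_go_ws_end w hw cur acc
  | cons c s ih =>
    intro cur acc
    by_cases hc : PySem.Chars.isspace c
    · by_cases hcur : cur.isEmpty
      · simp [PySem.Chars.split₀.go, hc, hcur, ih]
      · simp [PySem.Chars.split₀.go, hc, hcur, ih]
    · simp [PySem.Chars.split₀.go, hc, ih]

theorem pv_split₀_lstrip (s : List Char) :
    PySem.Chars.split₀ (PySem.Chars.lstrip s) = PySem.Chars.split₀ s := by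
  unfold PySem.Chars.split₀ PySem.Chars.lstrip
  induction s with
  | nil => rfl
  | cons c s ih =>
    by_cases hc : PySem.Chars.isspace c
    · simpa [hc, PySem.Chars.split₀.go] using ih
    · simp [hc]

theorem pv_split₀_rstrip (s : List Char) :
    PySem.Chars.split₀ (PySem.Chars.rstrip s) = PySem.Chars.split₀ s := by
  unfold PySem.Chars.split₀
  have hdecomp : s = PySem.Chars.rstrip s ++ (List.takeWhile PySem.Chars.isspace s.reverse).reverse := by
    unfold PySem.Chars.rstrip
    calc s = s.reverse.reverse := (List.reverse_reverse s).symm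
    _ = (List.takeWhile PySem.Chars.isspace s.reverse ++ List.dropWhile PySem.Chars.isspace s.reverse).reverse := by
        rw [List.takeWhile_append_dropWhile]
    _ = (List.dropWhile PySem.Chars.isspace s.reverse).reverse ++ (List.takeWhile PySem.Chars.isspace s.reverse).reverse := by
        rw [List.reverse_append]
  have hw : ∀ c ∈ (List.takeWhile PySem.Chars.isspace s.reverse).reverse, PySem.Chars.isspace c = true := by
    intro c hc
    exact List.mem_takeWhile_imp (by simpa using hc)
  conv_rhs => rw [hdecomp]
  rw [pv_go_append_ws _ hw]

theorem pv_split₀_strip (s : List Char) :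
    PySem.Chars.split₀ (PySem.Chars.strip s) = PySem.Chars.split₀ s := by
  unfold PySem.Chars.strip
  rw [pv_split₀_rstrip, pv_split₀_lstrip]

def pvTok (t : List Char) : Prop := t ≠ [] ∧ ∀ c ∈ t, PySem.Chars.isspace c = false

theorem pv_go_tokens :
    ∀ (s cur : List Char) (acc : List (List Char)),
      (∀ t ∈ acc, pvTok t) → (∀ c ∈ cur, PySem.Chars.isspace c = false) →
      ∀ t ∈ PySem.Chars.split₀.go s cur acc, pvTok t := by
  intro s
  induction s with
  | nil =>
    intro cur acc hacc hcur t ht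
    by_cases hc : cur.isEmpty
    · simp [PySem.Chars.split₀.go, hc] at ht
      exact hacc t (by simpa using ht)
    · simp [PySem.Chars.split₀.go, hc] at ht
      rcases ht with h | h
      · exact hacc t h
      · subst h
        refine ⟨by simpa [List.isEmpty_iff] using hc, fun c hcm => hcur c (by simpa using hcm)⟩
  | cons c s ih =>
    intro cur acc hacc hcur t ht
    by_cases hc : PySem.Chars.isspace c
    · by_cases hcu : cur.isEmpty
      · simp [PySem.Chars.split₀.go, hc, hcu] at ht
        exact ih [] acc hacc (by simp) t ht
      · simp [PySem.Chars.split₀.go, hc, hcu] at ht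
        refine ih [] (cur.reverse :: acc) ?_ (by simp) t ht
        intro u hu
        rcases List.mem_cons.mp hu with h | h
        · subst h
          exact ⟨by simpa [List.isEmpty_iff] using hcu, fun x hx => hcur x (by simpa using hx)⟩
        · exact hacc u h
    · simp [PySem.Chars.split₀.go, hc] at ht
      refine ih (c :: cur) acc hacc ?_ t ht
      intro x hx
      rcases List.mem_cons.mp hx with h | h
      · subst h; simpa using hc
      · exact hcur x h

theorem pv_split₀_tokens (s : List Char) : ∀ t ∈ PySem.Chars.split₀ s, pvTok t := by
  unfold PySem.Chars.split₀
  exact pv_go_tokens s [] [] (by simp) (by simp)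

-- ---------- scan lemmas ----------
def pvSep (r : List Char) : Prop := r = [] ∨ ∃ r', r = ' ' :: r'

theorem pv_scan_after (r : List Char) (hr : pvSep r) (q : Char) : pvScan r q = pvScan r ' ' := by
  rcases hr with rfl | ⟨r', rfl⟩
  · rfl
  · simp [pvScan]

theorem pv_scan_run (t : List Char) (ht : ∀ c ∈ t, c ≠ ' ') (r : List Char) (hr : pvSep r) :
    ∀ p, p ≠ ' ' → pvScan (t ++ r) p = t ++ pvScan r ' ' := by
  induction t with
  | nil => intro p hp; simpa using pv_scan_after r hr p
  | cons c t ih =>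
    intro p hp
    have hc : c ≠ ' ' := ht c (by simp)
    have ht' : ∀ x ∈ t, x ≠ ' ' := fun x hx => ht x (by simp [hx])
    simp [pvScan, hp, ih ht' c hc]

theorem pv_scan_word (t : List Char) (hne : t ≠ []) (ht : ∀ c ∈ t, c ≠ ' ')
    (r : List Char) (hr : pvSep r) :
    pvScan (t ++ r) ' ' = pvG t ++ pvScan r ' ' := by
  match t, hne with
  | [c], _ =>
    have hc : c ≠ ' ' := ht c (by simp)
    have h3 : (r.head?.getD ' ' != ' ') = false := by
      rcases hr with rfl | ⟨r', rfl⟩ <;> simp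
    simp [pvScan, pvG, h3, pv_scan_after r hr c]
  | c :: d :: t', _ =>
    have hc : c ≠ ' ' := ht c (by simp)
    have hd : d ≠ ' ' := ht d (by simp)
    have hrun := pv_scan_run (d :: t') (fun x hx => ht x (by simp [hx])) r hr c hc
    simp only [List.cons_append] at hrun
    have hstep : pvScan (c :: d :: (t' ++ r)) ' '
        = if ((c == '@' || c == '#') && (' ' == ' ') && ((d :: (t' ++ r)).head?.getD ' ' != ' ')) = true
          then c :: ' ' :: pvScan (d :: (t' ++ r)) c else c :: pvScan (d :: (t' ++ r)) c := rfl
    rw [List.cons_append, List.cons_append, hstep]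
    by_cases hcs : c = '@' ∨ c = '#'
    · rw [if_pos (by rcases hcs with rfl | rfl <;> simp [hd]), hrun]
      simp [pvG, hcs]
    · rw [if_neg (by
        intro hcon
        simp at hcon
        exact hcs (by tauto)), hrun]
      simp [pvG, hcs]

theorem pv_scan_join : ∀ ts : List (List Char), (∀ t ∈ ts, t ≠ [] ∧ ∀ c ∈ t, c ≠ ' ') →
    pvScan (PySem.Chars.join [' '] ts) ' ' = PySem.Chars.join [' '] (ts.map pvG) := by
  intro ts
  induction ts with
  | nil => intro _; rw [List.map_nil, PySem.Chars.join_nil]; rfl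
  | cons t ts ih =>
    intro h
    obtain ⟨hne, hns⟩ := h t (by simp)
    have hts : ∀ u ∈ ts, u ≠ [] ∧ ∀ c ∈ u, c ≠ ' ' := fun u hu => h u (by simp [hu])
    cases ts with
    | nil =>
      simp only [PySem.Chars.join_singleton, List.map_cons, List.map_nil]
      simpa [pvScan] using pv_scan_word t hne hns [] (Or.inl rfl)
    | cons u ts' =>
      rw [PySem.Chars.join_cons_cons, List.map_cons, List.map_cons, PySem.Chars.join_cons_cons]
      have hJ : t ++ [' '] ++ PySem.Chars.join [' '] (u :: ts') =
          t ++ (' ' :: PySem.Chars.join [' '] (u :: ts')) := by simp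
      rw [hJ, pv_scan_word t hne hns _ (Or.inr ⟨_, rfl⟩)]
      have hsp : pvScan (' ' :: PySem.Chars.join [' '] (u :: ts')) ' ' =
          ' ' :: pvScan (PySem.Chars.join [' '] (u :: ts')) ' ' := by simp [pvScan]
      rw [hsp, ih hts, List.map_cons]
      simp

-- ---------- A-side reshaping ----------
theorem pvTokStep_eq (acc : List String) (token : String) :
    pvTokStep acc token = acc ++ pvTokStep [] token := by
  unfold pvTokStep; split_ifs <;> simp

theorem pv_foldl_tok (ts : List String) :
    ts.foldl pvTokStep [] = ts.flatMap (fun tok => pvTokStep [] tok) := by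
  rw [show ts.foldl pvTokStep ([] : List String)
        = ts.foldl (fun acc tok => acc ++ pvTokStep [] tok) [] from by
      congr 1
      funext acc tok
      exact pvTokStep_eq acc tok]
  simpa using PySem.List.foldl_append_eq_flatMap (fun tok => pvTokStep [] tok) ts []

theorem pv_join_append (sep : List Char) (l1 l2 : List (List Char)) (h1 : l1 ≠ []) (h2 : l2 ≠ []) :
    PySem.Chars.join sep (l1 ++ l2) = PySem.Chars.join sep l1 ++ sep ++ PySem.Chars.join sep l2 := by
  induction l1 with
  | nil => exact absurd rfl h1
  | cons a l1 ih =>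
    cases l1 with
    | nil =>
      cases l2 with
      | nil => exact absurd rfl h2
      | cons b l2' => simp [PySem.Chars.join_cons_cons, PySem.Chars.join_singleton]
    | cons a' l1' =>
      have hih := ih (by simp)
      have h₁ : (a :: a' :: l1') ++ l2 = a :: a' :: (l1' ++ l2) := by simp
      rw [h₁, PySem.Chars.join_cons_cons]
      rw [show (a' :: (l1' ++ l2)) = (a' :: l1') ++ l2 from by simp, hih,
        PySem.Chars.join_cons_cons]
      simp [List.append_assoc]

theorem pv_join_flatMap {α : Type} (ps : α → List (List Char)) :
    ∀ ts : List α, (∀ t ∈ ts, ps t ≠ []) →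
    PySem.Chars.join [' '] (ts.flatMap ps) =
      PySem.Chars.join [' '] (ts.map (fun t => PySem.Chars.join [' '] (ps t))) := by
  intro ts
  induction ts with
  | nil => intro _; simp
  | cons t ts ih =>
    intro h
    cases ts with
    | nil => simp
    | cons u ts' =>
      have hps : ps t ≠ [] := h t (by simp)
      have hflat : ps u ++ List.flatMap ps ts' ≠ [] := by
        have hu : ps u ≠ [] := h u (by simp)
        intro hcon
        exact hu (List.append_eq_nil_iff.mp hcon).1
      have happ := pv_join_append [' '] (ps t) (ps u ++ List.flatMap ps ts') hps hflat
      rw [show List.flatMap ps (t :: u :: ts') = ps t ++ (ps u ++ List.flatMap ps ts') from by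
        simp [List.flatMap_cons]]
      rw [happ]
      rw [show (ps u ++ List.flatMap ps ts') = List.flatMap ps (u :: ts') from by
        simp [List.flatMap_cons]]
      rw [ih (fun x hx => h x (by simp [hx]))]
      simp [PySem.Chars.join_cons_cons, List.append_assoc]

theorem pv_piece (token : String) (h : token.toList ≠ []) :
    PySem.Chars.join [' '] (List.map String.toList (pvTokStep [] token)) = pvG token.toList := by
  unfold pvTokStep
  rcases htl : token.toList with _ | ⟨c, rest⟩
  · exact absurd htl h
  have hget : PySem.Str.pyGet? token 0 = some c := by
    rw [show ((0:Int)) = ((0:Nat):Int) from rfl, PySem.Str.pyGet?_natCast, htl]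
    simp
  have hlen : PySem.Str.len token = ((c :: rest).length : Int) := by
    rw [PySem.Str.len_eq, htl]
  cases rest with
  | nil =>
    rw [if_neg]
    · simp [htl, pvG]
    · rw [hlen]
      intro hcon
      simp at hcon
  | cons d rest' =>
    have hslice : (PySem.Str.slice token (some 1) none).toList = d :: rest' := by
      rw [PySem.Str.toList_slice, htl]
      simp [PySem.List.slice_from_one]
    by_cases hcs : c = '@' ∨ c = '#'
    · rw [if_pos]
      · rw [show (PySem.Str.pyGet? token 0).map (fun c => String.ofList [c]) = some (String.ofList [c]) from by
          rw [hget]; rfl]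
        simp only [Option.getD_some, List.nil_append, List.map_cons, List.map_nil]
        rw [PySem.Chars.join_cons_cons, PySem.Chars.join_singleton, hslice]
        simp [pvG, hcs]
      · refine ⟨by rw [hlen]; simp, ?_⟩
        rw [hget]
        rcases hcs with rfl | rfl
        · exact Or.inl rfl
        · exact Or.inr rfl
    · rw [if_neg]
      · simp [htl, pvG, hcs]
      · rintro ⟨-, hor⟩
        rw [hget] at hor
        rcases hor with h' | h' <;> simp at h' <;> exact hcs (by simp [h'])

-- ---------- main ----------
set_option maxHeartbeats 1000000 in
theorem pv_main (text : String) : preprocess_twitter text = preprocess_twitter_alt text := by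
  apply String.toList_inj.mp
  unfold preprocess_twitter preprocess_twitter_alt
  rw [String.toList_ofList, PySem.Str.toList_join, PySem.Str.toList_join]
  simp only [show (" " : String).toList = [' '] from by decide]
  rw [PySem.Str.split₀_map_toList]
  have htoks := pv_split₀_tokens text.toList
  have htoks' : ∀ t ∈ PySem.Chars.split₀ text.toList, t ≠ [] ∧ ∀ c ∈ t, c ≠ ' ' := by
    intro t ht
    obtain ⟨h1, h2⟩ := htoks t ht
    refine ⟨h1, fun c hc => ?_⟩
    intro hcc
    subst hcc
    exact absurd (h2 ' ' hc) (by decide)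
  rw [pv_scan_join _ htoks']
  rw [pv_foldl_tok, List.map_flatMap]
  rw [pv_join_flatMap (fun tok => List.map String.toList (pvTokStep [] tok)) _
    (by
      intro tok _
      dsimp only
      unfold pvTokStep
      split_ifs <;> simp)]
  rw [show (fun t => PySem.Chars.join [' '] (List.map String.toList (pvTokStep [] t)))
        = fun t => PySem.Chars.join [' '] (List.map String.toList (pvTokStep [] t)) from rfl]
  apply congrArg
  have hAtoks : List.map String.toList (PySem.Str.split₀ (PySem.Str.strip text))
      = PySem.Chars.split₀ text.toList := by
    rw [PySem.Str.split₀_map_toList, PySem.Str.toList_strip, pv_split₀_strip]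
  rw [show (PySem.Chars.split₀ text.toList).map pvG
        = (List.map String.toList (PySem.Str.split₀ (PySem.Str.strip text))).map pvG from by rw [hAtoks],
    List.map_map]
  apply List.map_congr_left
  intro tok htk
  apply pv_piece
  intro hnil
  have : tok.toList ∈ PySem.Chars.split₀ text.toList := by
    rw [← hAtoks]
    exact List.mem_map_of_mem htk
  exact (htoks tok.toList this).1 hnil

-- ===== VERDICT (by name: the statement is the Claim_ definition above) =====
theorem preprocess_twitter_spec : Claim_equal_preprocess_twitter := by
  intro text _
  unfold Spec_preprocess_twitter
  exact pv_main text
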